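-- pv_equiv track=rewrite | github.com/altancabal/hotelsoffers-recommender | main.py | keepOnlyLowestPricedValueOnSameId
-- ===== SOURCE A (Python) =====
-- def keepOnlyLowestPricedValueOnSameId(promos):
--   # Initialize an empty dictionary
--   id_dict = {}
--
--   # Iterate through the list of dictionaries
--   for d in promos:
--     # If the id is not in the dictionary, add it as a key and the dictionary as the value
--     if d["promo_id"] not in id_dict:
--       id_dict[d["promo_id"]] = [d]
--     # If the id is already in the dictionary, append the dictionary to the list of dictionaries
--     else:
--       id_dict[d["promo_id"]].append(d)
--
--   # Initialize an empty list to store the dictionaries with the lowest prices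
--   filtered_list = []
--
--   # Iterate through the dictionary
--   for id_key, dict_list in id_dict.items():
--     # Find the dictionary with the lowest price
--     lowest_price_dict = min(dict_list, key=lambda x: x["price"])
--     # Append the dictionary with the lowest price to the list
--     filtered_list.append(lowest_price_dict)
--
--   return filtered_list
-- ===== SOURCE B (Python) =====
-- def keepOnlyLowestPricedValueOnSameId(promos):
--   # One pass: keep the cheapest promo seen so far per promo_id (strict '<' keeps the earlier on ties).
--   best = {}
--   for d in promos:
--     k = d["promo_id"]
--     if k not in best or d["price"] < best[k]["price"]:
--       best[k] = d
--   return list(best.values())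
-- ===== Notes on version B (the rewrite author's own statement) =====
-- stated objective: simpler
-- what changed: Replaces A's two-phase group-then-min (build a dict of lists per promo_id, then scan each group with min) by a single pass that keeps only the cheapest promo seen so far per promo_id, returning the dict's values.
import Mathlib
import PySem

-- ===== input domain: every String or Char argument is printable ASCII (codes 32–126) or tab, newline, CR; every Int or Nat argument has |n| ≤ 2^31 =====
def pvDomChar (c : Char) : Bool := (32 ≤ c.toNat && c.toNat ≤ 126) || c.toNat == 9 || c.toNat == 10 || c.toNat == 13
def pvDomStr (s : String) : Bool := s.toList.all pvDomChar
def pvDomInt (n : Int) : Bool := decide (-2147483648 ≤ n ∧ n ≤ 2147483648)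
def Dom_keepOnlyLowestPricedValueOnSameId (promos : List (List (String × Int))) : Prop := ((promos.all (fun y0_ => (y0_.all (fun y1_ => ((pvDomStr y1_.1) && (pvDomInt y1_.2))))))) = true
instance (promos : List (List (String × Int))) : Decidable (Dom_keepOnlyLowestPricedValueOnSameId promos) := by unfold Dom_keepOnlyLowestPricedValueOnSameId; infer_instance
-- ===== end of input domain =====

-- B replaces A's group-into-lists-then-min with a single pass keeping the cheapest promo per id (simpler; return value only).

-- d[key] for an inner dict; exact under Pre_ (the key is present; absent keys = KeyError, excluded by Pre_)
def pvItem (d : List (String × Int)) (k : String) : Int := (PySem.Dict.ofList d).getD k 0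

-- ===== PORT A =====
def keepOnlyLowestPricedValueOnSameId (promos : List (List (String × Int))) : List (List (String × Int)) :=
  let id_dict : PySem.Dict Int (List (List (String × Int))) :=
    promos.foldl (fun id_dict d =>
      if id_dict.contains (pvItem d "promo_id") = false then
        id_dict.insert (pvItem d "promo_id") [d]
      else
        id_dict.modify (pvItem d "promo_id") [] (fun l => l ++ [d])) PySem.Dict.empty
  id_dict.items.foldl (fun filtered_list p =>
    filtered_list ++ [(PySem.List.min? p.2 (fun x => pvItem x "price")).getD []]) []
  -- '.getD []' only totalises min(): every stored list is nonempty, so Python's ValueError branch is unreachable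

-- ===== PORT B =====
def keepOnlyLowestPricedValueOnSameId_alt (promos : List (List (String × Int))) : List (List (String × Int)) :=
  (promos.foldl (fun best d =>
      match best.get? (pvItem d "promo_id") with
      | none => best.insert (pvItem d "promo_id") d
      | some cur =>
        if pvItem d "price" < pvItem cur "price" then best.insert (pvItem d "promo_id") d
        else best) (PySem.Dict.empty : PySem.Dict Int (List (String × Int)))).values

-- ===== PRECONDITION & SPEC =====
-- Pre_ excludes promos missing the "promo_id" or "price" key, on which A raises KeyError.
def Pre_keepOnlyLowestPricedValueOnSameId (promos : List (List (String × Int))) : Prop :=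
  (promos.all (fun d => d.any (fun p => p.1 == "promo_id") && d.any (fun p => p.1 == "price"))) = true
instance (promos : List (List (String × Int))) : Decidable (Pre_keepOnlyLowestPricedValueOnSameId promos) := by unfold Pre_keepOnlyLowestPricedValueOnSameId; infer_instance

def pvWitness_keepOnlyLowestPricedValueOnSameId : (List (List (String × Int))) :=
  [[("promo_id", 1), ("price", 7)], [("promo_id", 1), ("price", 3)], [("promo_id", 2), ("price", 5)]]

def Spec_keepOnlyLowestPricedValueOnSameId (promos : List (List (String × Int))) (out : List (List (String × Int))) : Prop := out = keepOnlyLowestPricedValueOnSameId_alt promos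
instance (promos : List (List (String × Int))) (out : List (List (String × Int))) : Decidable (Spec_keepOnlyLowestPricedValueOnSameId promos out) := by unfold Spec_keepOnlyLowestPricedValueOnSameId; infer_instance

-- ===== CLAIM (what is proved, stated in full; the proofs are below) =====
def Claim_equal_keepOnlyLowestPricedValueOnSameId : Prop := ∀ (promos : List (List (String × Int))), Dom_keepOnlyLowestPricedValueOnSameId promos → Pre_keepOnlyLowestPricedValueOnSameId promos → Spec_keepOnlyLowestPricedValueOnSameId promos (keepOnlyLowestPricedValueOnSameId promos)

-- ===== LEMMAS AND PROOFS =====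

-- shorthands for the two field lookups and the two loop bodies
def pvPid (d : List (String × Int)) : Int := pvItem d "promo_id"
def pvPrice (d : List (String × Int)) : Int := pvItem d "price"

def pvStepA (id_dict : PySem.Dict Int (List (List (String × Int)))) (d : List (String × Int)) :
    PySem.Dict Int (List (List (String × Int))) :=
  if id_dict.contains (pvItem d "promo_id") = false then
    id_dict.insert (pvItem d "promo_id") [d]
  else
    id_dict.modify (pvItem d "promo_id") [] (fun l => l ++ [d])

def pvStepB (best : PySem.Dict Int (List (String × Int))) (d : List (String × Int)) :
    PySem.Dict Int (List (String × Int)) :=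
  match best.get? (pvItem d "promo_id") with
  | none => best.insert (pvItem d "promo_id") d
  | some cur =>
    if pvItem d "price" < pvItem cur "price" then best.insert (pvItem d "promo_id") d
    else best

-- the invariant tying A's grouped dict to B's best-so-far dict
def pvInv (dA : PySem.Dict Int (List (List (String × Int)))) (dB : PySem.Dict Int (List (String × Int))) : Prop :=
  dA.keys = dB.keys ∧ dA.keys.Nodup ∧
  ∀ k ∈ dA.keys, PySem.List.min? (dA.getD k []) (fun x => pvItem x "price") = some (dB.getD k [])

theorem pvMin?_append_singleton {α κ : Type} [LT κ] [DecidableLT κ] (L : List α) (d : α) (key : α → κ) :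
    PySem.List.min? (L ++ [d]) key =
      match PySem.List.min? L key with
      | none => some d
      | some m => if key d < key m then some d else some m := by
  simp only [PySem.List.min?, List.foldl_append, List.foldl_cons, List.foldl_nil]
  rfl

theorem pvInv_step (dA : PySem.Dict Int (List (List (String × Int)))) (dB : PySem.Dict Int (List (String × Int)))
    (d : List (String × Int)) (h : pvInv dA dB) : pvInv (pvStepA dA d) (pvStepB dB d) := by
  obtain ⟨hkeys, hnd, hmin⟩ := h
  set k0 : Int := pvItem d "promo_id" with hk0
  by_cases hc : dA.contains k0 = true
  · -- key already present: A appends to the group, B compares with the current best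
    have hkmem : k0 ∈ dA.keys := (PySem.Dict.contains_iff_mem_keys dA k0).mp hc
    have hmin0 := hmin k0 hkmem
    have hBsome : dB.get? k0 = some (dB.getD k0 []) := by
      cases hB : dB.get? k0 with
      | none => exact absurd (hkeys ▸ hkmem) ((PySem.Dict.get?_eq_none_iff_not_mem_keys dB k0).mp hB)
      | some v => simp [PySem.Dict.getD_eq_get?_getD, hB]
    have hA : pvStepA dA d = dA.modify k0 [] (fun l => l ++ [d]) := by
      simp [pvStepA, ← hk0, hc]
    have hAkeys : (pvStepA dA d).keys = dA.keys := by
      rw [hA, PySem.Dict.keys_modify]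
      exact PySem.Dict.keys_insert_of_contains dA _ hc
    have hBcont : dB.contains k0 = true := (PySem.Dict.contains_iff_mem_keys dB k0).mpr (hkeys ▸ hkmem)
    have hBkeys : (pvStepB dB d).keys = dB.keys := by
      simp only [pvStepB, ← hk0, hBsome]
      split
      · exact PySem.Dict.keys_insert_of_contains dB _ hBcont
      · rfl
    refine ⟨by rw [hAkeys, hBkeys, hkeys], hAkeys ▸ hnd, ?_⟩
    intro k hk
    rw [hAkeys] at hk
    by_cases hkk : k = k0
    · subst hkk
      have hAget : (pvStepA dA d).getD k0 [] = dA.getD k0 [] ++ [d] :=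
        hA ▸ PySem.Dict.getD_modify_self dA k0 [] _
      rw [hAget, pvMin?_append_singleton, hmin0]
      simp only [pvStepB, ← hk0, hBsome]
      split
      · simp [PySem.Dict.getD_insert_self]
      · simp
    · have hAget : (pvStepA dA d).getD k [] = dA.getD k [] :=
        hA ▸ PySem.Dict.getD_modify_of_ne dA [] _ hkk
      have hBget : (pvStepB dB d).getD k [] = dB.getD k [] := by
        simp only [pvStepB, ← hk0, hBsome]
        split
        · exact PySem.Dict.getD_insert_of_ne dB _ _ hkk
        · rfl
      rw [hAget, hBget]; exact hmin k hk
  · -- fresh key: both sides append a new entry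
    have hc' : dA.contains k0 = false := by
      cases h : dA.contains k0 with
      | false => rfl
      | true => exact absurd h hc
    have hkmem : k0 ∉ dA.keys := fun hm => hc ((PySem.Dict.contains_iff_mem_keys dA k0).mpr hm)
    have hBnone : dB.get? k0 = none :=
      (PySem.Dict.get?_eq_none_iff_not_mem_keys dB k0).mpr (hkeys ▸ hkmem)
    have hBcont : dB.contains k0 = false := by
      cases h : dB.contains k0 with
      | false => rfl
      | true => exact absurd ((PySem.Dict.contains_iff_mem_keys dB k0).mp h) (hkeys ▸ hkmem)
    have hA : pvStepA dA d = dA.insert k0 [d] := by simp [pvStepA, ← hk0, hc']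
    have hB : pvStepB dB d = dB.insert k0 d := by simp [pvStepB, ← hk0, hBnone]
    have hAkeys : (pvStepA dA d).keys = dA.keys ++ [k0] :=
      hA ▸ PySem.Dict.keys_insert_of_not_contains dA _ hc'
    have hBkeys : (pvStepB dB d).keys = dB.keys ++ [k0] :=
      hB ▸ PySem.Dict.keys_insert_of_not_contains dB _ hBcont
    refine ⟨by rw [hAkeys, hBkeys, hkeys], ?_, ?_⟩
    · rw [hAkeys]
      exact List.Nodup.append hnd (List.nodup_singleton k0) (by simpa using hkmem)
    · intro k hk
      rw [hAkeys] at hk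
      rcases List.mem_append.mp hk with hk | hk
      · have hkk : k ≠ k0 := fun he => hkmem (he ▸ hk)
        rw [hA, hB, PySem.Dict.getD_insert_of_ne dA _ _ hkk, PySem.Dict.getD_insert_of_ne dB _ _ hkk]
        exact hmin k hk
      · have hkk : k = k0 := by simpa using hk
        subst hkk
        rw [hA, hB, PySem.Dict.getD_insert_self, PySem.Dict.getD_insert_self]
        simp [PySem.List.min?]

theorem pvInv_foldl (l : List (List (String × Int))) (dA : PySem.Dict Int (List (List (String × Int))))
    (dB : PySem.Dict Int (List (String × Int))) (h : pvInv dA dB) :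
    pvInv (l.foldl pvStepA dA) (l.foldl pvStepB dB) := by
  induction l generalizing dA dB with
  | nil => exact h
  | cons d t ih => exact ih _ _ (pvInv_step dA dB d h)

-- ===== VERDICT (by name: the statement is the Claim_ definition above) =====
theorem keepOnlyLowestPricedValueOnSameId_spec : Claim_equal_keepOnlyLowestPricedValueOnSameId := by
  intro promos _ _
  unfold Spec_keepOnlyLowestPricedValueOnSameId
  have hinv : pvInv (promos.foldl pvStepA PySem.Dict.empty) (promos.foldl pvStepB PySem.Dict.empty) := by
    refine pvInv_foldl promos _ _ ⟨?_, ?_, ?_⟩ <;> simp [PySem.Dict.empty, PySem.Dict.keys]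
  obtain ⟨hkeys, hnd, hmin⟩ := hinv
  show (promos.foldl pvStepA PySem.Dict.empty).items.foldl
      (fun filtered_list p => filtered_list ++ [(PySem.List.min? p.2 (fun x => pvItem x "price")).getD []]) []
    = (promos.foldl pvStepB PySem.Dict.empty).values
  rw [show (fun (filtered_list : List (List (String × Int))) (p : Int × List (List (String × Int))) => filtered_list ++ [(PySem.List.min? p.2 (fun x => pvItem x "price")).getD []]) = (fun acc p => acc ++ [(fun (q : Int × List (List (String × Int))) => (PySem.List.min? q.2 (fun x => pvItem x "price")).getD []) p]) from rfl,
      PySem.List.foldl_append_singleton_eq_map,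
      PySem.Dict.items_eq_map_keys _ hnd [],
      PySem.Dict.values_eq_map_keys _ (hkeys ▸ hnd) [], ← hkeys, List.map_map, List.nil_append]
  refine List.map_congr_left (fun k hk => ?_)
  simp [hmin k hk]
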